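-- pv_equiv track=rewrite | github.com/ellismith/uke | uke2.py | rank_keys
-- ===== SOURCE A (Python) =====
-- def rank_keys(chords_dict, chord_counter):
--     key_scores = {}
--     for key, key_chords in chords_dict.items():
--         key_scores[key] = 0
--         for song_chord, num_times in chord_counter.items():
--             if song_chord in key_chords:
--                 key_scores[key] += num_times
--     return key_scores
-- ===== SOURCE B (Python) =====
-- def rank_keys(chords_dict, chord_counter):
--     key_scores = dict.fromkeys(chords_dict, 0)
--     index = {}
--     for key, key_chords in chords_dict.items():
--         for chord in dict.fromkeys(key_chords):
--             index.setdefault(chord, []).append(key)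
--     for song_chord, num_times in chord_counter.items():
--         for key in index.get(song_chord, []):
--             key_scores[key] += num_times
--     return key_scores
-- ===== Notes on version B (the rewrite author's own statement) =====
-- stated objective: faster
-- what changed: B builds an inverted chord->keys index once, initialises every key's score to 0, then walks the counter a single time adding each count to exactly the keys whose chord lists contain that chord, instead of A's per-key rescan of the whole counter with a list-membership test inside.
import Mathlib
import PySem

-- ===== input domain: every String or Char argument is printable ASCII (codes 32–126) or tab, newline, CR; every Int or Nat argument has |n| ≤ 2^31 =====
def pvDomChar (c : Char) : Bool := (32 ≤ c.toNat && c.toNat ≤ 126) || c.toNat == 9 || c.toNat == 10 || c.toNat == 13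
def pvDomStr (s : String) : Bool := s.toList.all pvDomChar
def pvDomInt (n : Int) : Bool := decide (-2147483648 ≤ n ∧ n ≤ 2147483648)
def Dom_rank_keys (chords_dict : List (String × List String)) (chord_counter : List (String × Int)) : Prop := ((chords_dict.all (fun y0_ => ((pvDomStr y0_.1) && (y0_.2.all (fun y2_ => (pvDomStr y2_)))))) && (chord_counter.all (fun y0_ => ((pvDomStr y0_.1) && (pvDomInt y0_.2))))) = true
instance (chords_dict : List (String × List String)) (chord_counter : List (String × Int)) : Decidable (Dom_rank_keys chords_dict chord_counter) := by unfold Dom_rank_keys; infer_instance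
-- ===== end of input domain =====

-- B replaces A's per-key rescan of the counter (list membership inside) by an inverted chord->keys
-- index built once, then one pass over the counter adding each count to exactly the matching keys;
-- equivalence proved for chords_dict association lists without duplicate keys.


-- ===== PORT A =====
def rank_keys (chords_dict : List (String × List String)) (chord_counter : List (String × Int)) : List (String × Int) :=
  (chords_dict.foldl
    (fun key_scores kv =>
      chord_counter.foldl
        (fun ks p =>
          if kv.2.contains p.1 then ks.insert kv.1 (ks.getD kv.1 0 + p.2) else ks)
        (key_scores.insert kv.1 0))
    PySem.Dict.empty).items

-- ===== PORT B =====
-- phase 1 of Source B: key_scores = dict.fromkeys(chords_dict, 0)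
def rk_fromkeys (chords_dict : List (String × List String)) : PySem.Dict String Int :=
  chords_dict.foldl (fun d kv => d.insert kv.1 0) PySem.Dict.empty

-- phase 2 of Source B: the inverted index chord -> list of keys whose chord list contains it
def rk_index (chords_dict : List (String × List String)) : PySem.Dict String (List String) :=
  chords_dict.foldl
    (fun ix kv =>
      (PySem.List.dedup kv.2).foldl (fun ix c => ix.modify c [] (· ++ [kv.1])) ix)
    PySem.Dict.empty

-- phase 3 of Source B: one pass over the counter, adding each count to the indexed keys
def rank_keys_alt (chords_dict : List (String × List String)) (chord_counter : List (String × Int)) : List (String × Int) :=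
  (chord_counter.foldl
    (fun ks p =>
      ((rk_index chords_dict).getD p.1 []).foldl
        (fun ks k => ks.insert k (ks.getD k 0 + p.2)) ks)
    (rk_fromkeys chords_dict)).items

-- ===== PRECONDITION & SPEC =====
-- Pre_ excludes chords_dict association lists with duplicate keys: such lists cannot arise from the
-- Python dict the function receives, and on them A's reset-and-recompute (last occurrence wins) vs
-- B's merged index are both accidental representation artefacts.
def Pre_rank_keys (chords_dict : List (String × List String)) (chord_counter : List (String × Int)) : Prop :=
  (chords_dict.map Prod.fst).Nodup
instance (chords_dict : List (String × List String)) (chord_counter : List (String × Int)) : Decidable (Pre_rank_keys chords_dict chord_counter) := by unfold Pre_rank_keys; infer_instance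
def pvWitness_rank_keys : (List (String × List String)) × (List (String × Int)) :=
  ([("C", ["C", "F", "G"]), ("G", ["G", "C", "D"])], [("C", 3), ("D", 1), ("Am", 2)])

def Spec_rank_keys (chords_dict : List (String × List String)) (chord_counter : List (String × Int)) (out : List (String × Int)) : Prop := out = rank_keys_alt chords_dict chord_counter
instance (chords_dict : List (String × List String)) (chord_counter : List (String × Int)) (out : List (String × Int)) : Decidable (Spec_rank_keys chords_dict chord_counter out) := by unfold Spec_rank_keys; infer_instance

-- ===== CLAIM (what is proved, stated in full; the proofs are below) =====
def Claim_equal_rank_keys : Prop := ∀ (chords_dict : List (String × List String)) (chord_counter : List (String × Int)), Dom_rank_keys chords_dict chord_counter → Pre_rank_keys chords_dict chord_counter → Spec_rank_keys chords_dict chord_counter (rank_keys chords_dict chord_counter)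

-- ===== LEMMAS AND PROOFS =====

-- A's per-key score of a chord list against the counter
def rk_score (cc : List (String × Int)) (chords : List String) : Int :=
  cc.foldl (fun s p => if chords.contains p.1 then s + p.2 else s) 0

-- A's inner loop only ever touches the key k: it turns (ks.insert k v) into ks.insert k (scalar fold).
theorem rk_inner (chords : List String) (k : String) (cc : List (String × Int))
    (ks : PySem.Dict String Int) (v : Int) :
    cc.foldl (fun ks p => if chords.contains p.1 then ks.insert k (ks.getD k 0 + p.2) else ks)
      (ks.insert k v)
    = ks.insert k (cc.foldl (fun s p => if chords.contains p.1 then s + p.2 else s) v) := by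
  induction cc generalizing v with
  | nil => rfl
  | cons p cc ih =>
    by_cases h : chords.contains p.1
    · simp only [List.foldl_cons, h, if_true, PySem.Dict.getD_insert_self,
        PySem.Dict.insert_insert_self]
      exact ih (v + p.2)
    · simp only [List.foldl_cons, h]
      exact ih v

-- A is the simple fold that inserts each key's score
theorem rk_A_eq (cd : List (String × List String)) (cc : List (String × Int)) :
    ∀ ks : PySem.Dict String Int,
    cd.foldl
      (fun key_scores kv =>
        cc.foldl
          (fun ks p => if kv.2.contains p.1 then ks.insert kv.1 (ks.getD kv.1 0 + p.2) else ks)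
          (key_scores.insert kv.1 0)) ks
    = cd.foldl (fun ks kv => ks.insert kv.1 (rk_score cc kv.2)) ks := by
  induction cd with
  | nil => intro ks; rfl
  | cons kv cd ih =>
    intro ks
    simp only [List.foldl_cons]
    rw [rk_inner kv.2 kv.1 cc ks 0]
    exact ih _

-- a fold of inserts leaves untouched keys alone
theorem rk_getD_fold_nmem {ν : Type} (f : String × List String → ν)
    (cd : List (String × List String)) (k : String) (d0 : ν)
    (h : k ∉ cd.map Prod.fst) :
    ∀ d : PySem.Dict String ν,
    (cd.foldl (fun d kv => d.insert kv.1 (f kv)) d).getD k d0 = d.getD k d0 := by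
  induction cd with
  | nil => intro d; rfl
  | cons kv cd ih =>
    intro d
    simp only [List.map_cons, List.mem_cons, not_or] at h
    simp only [List.foldl_cons]
    rw [ih h.2, PySem.Dict.getD_insert, if_neg h.1]

-- with unique keys, a fold of inserts assigns each present key its own value
theorem rk_getD_fold_mem {ν : Type} (f : String × List String → ν)
    (cd : List (String × List String)) (hnd : (cd.map Prod.fst).Nodup)
    (k : String) (chs : List String) (hmem : (k, chs) ∈ cd) (d0 : ν) :
    ∀ d : PySem.Dict String ν,
    (cd.foldl (fun d kv => d.insert kv.1 (f kv)) d).getD k d0 = f (k, chs) := by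
  induction cd with
  | nil => cases hmem
  | cons kv cd ih =>
    intro d
    simp only [List.map_cons, List.nodup_cons] at hnd
    rcases List.mem_cons.mp hmem with heq | htl
    · subst heq
      simp only [List.foldl_cons]
      rw [rk_getD_fold_nmem f cd k d0 hnd.1, PySem.Dict.getD_insert_self]
    · have hk : kv.1 ≠ k := by
        intro hkk
        exact hnd.1 (hkk ▸ (List.mem_map.mpr ⟨(k, chs), htl, rfl⟩))
      simp only [List.foldl_cons]
      exact ih hnd.2 htl _

-- keys of a fold of inserts from empty, with unique keys, are the keys in order
theorem rk_keys_fold {ν : Type} (f : String × List String → ν)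
    (cd : List (String × List String)) (hnd : (cd.map Prod.fst).Nodup) :
    (cd.foldl (fun d kv => d.insert kv.1 (f kv)) PySem.Dict.empty).keys = cd.map Prod.fst := by
  rw [PySem.Dict.keys_foldl_insert_key (key := Prod.fst) (f := fun _ kv => f kv)]
  rw [PySem.Dict.keys_empty, PySem.Set.update_nil_left]
  exact PySem.Set.ofList_eq_self_of_nodup _ hnd

-- with unique keys in cd, each key maps to a unique chord list
theorem rk_key_inj (cd : List (String × List String)) (hnd : (cd.map Prod.fst).Nodup)
    (k : String) (a b : List String) (ha : (k, a) ∈ cd) (hb : (k, b) ∈ cd) : a = b := by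
  induction cd with
  | nil => cases ha
  | cons kv cd ih =>
    simp only [List.map_cons, List.nodup_cons] at hnd
    rcases List.mem_cons.mp ha with h1 | h1 <;> rcases List.mem_cons.mp hb with h2 | h2
    · rw [← h1] at h2; exact (Prod.mk.injEq _ _ _ _ ▸ h2).2.symm
    · exact absurd (List.mem_map.mpr ⟨(k, b), h2, by rw [← h1]⟩) hnd.1
    · exact absurd (List.mem_map.mpr ⟨(k, a), h1, by rw [← h2]⟩) hnd.1
    · exact ih hnd.2 h1 h2

-- on a duplicate-free list, filtering for equality with c gives [c] or nothing
theorem rk_filter_beq (l : List String) (hnd : l.Nodup) (c : String) :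
    l.filter (fun x => x == c) = if c ∈ l then [c] else [] := by
  induction l with
  | nil => simp
  | cons x l ih =>
    rcases List.nodup_cons.mp hnd with ⟨hx, hl⟩
    by_cases hxc : x = c
    · subst hxc
      simp [ih hl, hx]
    · simp only [List.filter_cons, beq_iff_eq, hxc, if_false, List.mem_cons]
      rw [ih hl]
      simp [Ne.symm hxc]

-- characterisation of the inverted index: its list at c is the keys whose chord list contains c
theorem rk_index_getD (cd : List (String × List String)) (c : String) :
    ∀ ix : PySem.Dict String (List String),
    (cd.foldl
      (fun ix kv =>
        (PySem.List.dedup kv.2).foldl (fun ix c' => ix.modify c' [] (· ++ [kv.1])) ix)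
      ix).getD c []
    = ix.getD c [] ++ (cd.filter (fun kv => kv.2.contains c)).map Prod.fst := by
  induction cd with
  | nil => intro ix; simp
  | cons kv cd ih =>
    intro ix
    simp only [List.foldl_cons]
    rw [ih]
    have hstep :
        ((PySem.List.dedup kv.2).foldl (fun ix c' => ix.modify c' [] (· ++ [kv.1])) ix).getD c []
        = ix.getD c [] ++ (if kv.2.contains c then [kv.1] else []) := by
      have hmap : (PySem.List.dedup kv.2).foldl (fun ix c' => ix.modify c' [] (· ++ [kv.1])) ix
          = ((PySem.List.dedup kv.2).map (fun c' => (c', kv.1))).foldl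
              (fun d p => d.modify p.1 [] (· ++ [p.2])) ix := by
        rw [List.foldl_map]
      rw [hmap, PySem.Dict.getD_foldl_modify_append, List.filter_map]
      have : ((PySem.List.dedup kv.2).filter ((fun p => p.1 == c) ∘ fun c' => (c', kv.1)))
          = (PySem.List.dedup kv.2).filter (fun x => x == c) := rfl
      rw [this, rk_filter_beq _ (PySem.List.nodup_dedup kv.2) c]
      by_cases hc : c ∈ kv.2
      · rw [if_pos ((PySem.List.mem_dedup kv.2 c).mpr hc), if_pos (by simpa using hc)]
        rfl
      · rw [if_neg (fun h => hc ((PySem.List.mem_dedup kv.2 c).mp h)),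
          if_neg (by simpa using hc)]
        rfl
    rw [hstep, List.filter_cons]
    by_cases hc : c ∈ kv.2
    · simp [hc, List.append_assoc]
    · simp [hc]

-- membership in the index list at c, for a key of cd with unique keys
theorem rk_mem_index (cd : List (String × List String)) (hnd : (cd.map Prod.fst).Nodup)
    (k : String) (chs : List String) (hmem : (k, chs) ∈ cd) (c : String) :
    (k ∈ (rk_index cd).getD c []) ↔ chs.contains c := by
  unfold rk_index
  rw [rk_index_getD cd c PySem.Dict.empty]
  simp only [PySem.Dict.getD_empty, List.nil_append]
  constructor
  · intro h
    rcases List.mem_map.mp h with ⟨kv, hkv, hfst⟩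
    rcases List.mem_filter.mp hkv with ⟨hkv', hp⟩
    have : kv.2 = chs := rk_key_inj cd hnd k kv.2 chs (by rw [← hfst]; exact hkv') hmem
    rwa [← this]
  · intro h
    exact List.mem_map.mpr ⟨(k, chs), List.mem_filter.mpr ⟨hmem, h⟩, rfl⟩

-- each index list is duplicate-free (a sub-sequence of cd's unique keys)
theorem rk_index_nodup (cd : List (String × List String)) (hnd : (cd.map Prod.fst).Nodup)
    (c : String) : ((rk_index cd).getD c []).Nodup := by
  unfold rk_index
  rw [rk_index_getD cd c PySem.Dict.empty]
  simp only [PySem.Dict.getD_empty, List.nil_append]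
  exact hnd.sublist (List.Sublist.map Prod.fst List.filter_sublist)

-- every member of an index list is a key of cd
theorem rk_index_sub (cd : List (String × List String)) (c k : String)
    (h : k ∈ (rk_index cd).getD c []) : k ∈ cd.map Prod.fst := by
  unfold rk_index at h
  rw [rk_index_getD cd c PySem.Dict.empty] at h
  simp only [PySem.Dict.getD_empty, List.nil_append] at h
  rcases List.mem_map.mp h with ⟨kv, hkv, hfst⟩
  exact List.mem_map.mpr ⟨kv, (List.mem_filter.mp hkv).1, hfst⟩

-- B's inner loop adds w to each listed key once (the list is duplicate-free)
theorem rk_add_fold (ks : List String) (hnd : ks.Nodup) (k : String) (w : Int) :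
    ∀ d : PySem.Dict String Int,
    (ks.foldl (fun d k' => d.insert k' (d.getD k' 0 + w)) d).getD k 0
    = d.getD k 0 + (if k ∈ ks then w else 0) := by
  induction ks with
  | nil => intro d; simp
  | cons k' ks ih =>
    intro d
    rcases List.nodup_cons.mp hnd with ⟨hk', hks⟩
    simp only [List.foldl_cons, List.mem_cons]
    rw [ih hks]
    by_cases hm : k ∈ ks
    · have hne : k ≠ k' := fun h => hk' (h ▸ hm)
      rw [PySem.Dict.getD_insert, if_neg hne]
      simp [hm]
    · rw [PySem.Dict.getD_insert]
      by_cases he : k = k'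
      · subst he; simp [hm]
      · simp [he, hm]

-- B's counter pass: each key ends with its initial value plus the matching counts
theorem rk_phase3_getD (cd : List (String × List String)) (hnd : (cd.map Prod.fst).Nodup)
    (cc : List (String × Int)) (k : String) :
    ∀ d : PySem.Dict String Int,
    (cc.foldl
      (fun ks p =>
        ((rk_index cd).getD p.1 []).foldl (fun ks k' => ks.insert k' (ks.getD k' 0 + p.2)) ks)
      d).getD k 0
    = d.getD k 0 + (cc.map (fun p => if k ∈ (rk_index cd).getD p.1 [] then p.2 else 0)).sum := by
  induction cc with
  | nil => intro d; simp
  | cons p cc ih =>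
    intro d
    simp only [List.foldl_cons, List.map_cons, List.sum_cons]
    rw [ih, rk_add_fold _ (rk_index_nodup cd hnd p.1) k p.2 d]
    ring

-- inserting at an existing key leaves the key list unchanged, through a whole loop
theorem rk_keys_insert_fold (ks : List String) (w : Int) :
    ∀ d : PySem.Dict String Int, (∀ k ∈ ks, k ∈ d.keys) →
    (ks.foldl (fun d k' => d.insert k' (d.getD k' 0 + w)) d).keys = d.keys := by
  induction ks with
  | nil => intro d _; rfl
  | cons k' ks ih =>
    intro d h
    simp only [List.foldl_cons]
    have hc : d.contains k' = true :=
      (PySem.Dict.contains_iff_mem_keys d k').mpr (h k' (List.mem_cons_self))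
    have hkeys : (d.insert k' (d.getD k' 0 + w)).keys = d.keys :=
      PySem.Dict.keys_insert_of_contains d _ hc
    rw [ih _ (fun k hk => hkeys ▸ h k (List.mem_cons_of_mem _ hk))]
    exact hkeys

-- the counter pass never adds a key
theorem rk_phase3_keys (cd : List (String × List String)) (cc : List (String × Int)) :
    ∀ d : PySem.Dict String Int, (∀ k ∈ cd.map Prod.fst, k ∈ d.keys) →
    (cc.foldl
      (fun ks p =>
        ((rk_index cd).getD p.1 []).foldl (fun ks k' => ks.insert k' (ks.getD k' 0 + p.2)) ks)
      d).keys = d.keys := by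
  induction cc with
  | nil => intro d _; rfl
  | cons p cc ih =>
    intro d h
    simp only [List.foldl_cons]
    have hkeys := rk_keys_insert_fold ((rk_index cd).getD p.1 []) p.2 d
      (fun k hk => h k (rk_index_sub cd p.1 k hk))
    rw [ih _ (fun k hk => hkeys ▸ h k hk)]
    exact hkeys

-- the per-key score as a sum over the counter
theorem rk_score_sum (cc : List (String × Int)) (chords : List String) :
    rk_score cc chords = (cc.map (fun p => if chords.contains p.1 then p.2 else 0)).sum := by
  unfold rk_score
  have hfun : (fun (s : Int) (p : String × Int) => if chords.contains p.1 then s + p.2 else s)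
      = fun s p => s + (if chords.contains p.1 then p.2 else 0) := by
    funext s p; by_cases hp : p.1 ∈ chords <;> simp [hp]
  rw [hfun, PySem.List.foldl_add]
  simp

-- ===== VERDICT (by name: the statement is the Claim_ definition above) =====
theorem rank_keys_spec : Claim_equal_rank_keys := by
  intro cd cc _ hnd
  unfold Spec_rank_keys rank_keys rank_keys_alt
  rw [rk_A_eq cd cc PySem.Dict.empty]
  set dA := cd.foldl (fun ks kv => ks.insert kv.1 (rk_score cc kv.2)) PySem.Dict.empty with hdA
  set dB := cc.foldl
      (fun ks p =>
        ((rk_index cd).getD p.1 []).foldl (fun ks k' => ks.insert k' (ks.getD k' 0 + p.2)) ks)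
      (rk_fromkeys cd) with hdB
  have hkA : dA.keys = cd.map Prod.fst := rk_keys_fold (fun kv => rk_score cc kv.2) cd hnd
  have hk0 : (rk_fromkeys cd).keys = cd.map Prod.fst := rk_keys_fold (fun _ => 0) cd hnd
  have hkB : dB.keys = cd.map Prod.fst := by
    rw [hdB, rk_phase3_keys cd cc (rk_fromkeys cd) (fun k hk => hk0 ▸ hk)]
    exact hk0
  have hitA := PySem.Dict.items_eq_map_keys dA (by rw [hkA]; exact hnd) 0
  have hitB := PySem.Dict.items_eq_map_keys dB (by rw [hkB]; exact hnd) 0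
  rw [hitA, hitB, hkA, hkB]
  apply List.map_congr_left
  intro k hk
  rcases List.mem_map.mp hk with ⟨kv, hkv, hfst⟩
  have hmem : (k, kv.2) ∈ cd := by rw [← hfst]; exact hkv
  have hA : dA.getD k 0 = rk_score cc kv.2 :=
    rk_getD_fold_mem (fun kv => rk_score cc kv.2) cd hnd k kv.2 hmem 0 PySem.Dict.empty
  have h0 : (rk_fromkeys cd).getD k 0 = 0 :=
    rk_getD_fold_mem (fun _ => 0) cd hnd k kv.2 hmem 0 PySem.Dict.empty
  have hB : dB.getD k 0
      = (cc.map (fun p => if k ∈ (rk_index cd).getD p.1 [] then p.2 else 0)).sum := by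
    rw [hdB, rk_phase3_getD cd hnd cc k (rk_fromkeys cd), h0, zero_add]
  have hsum : (cc.map (fun p => if k ∈ (rk_index cd).getD p.1 [] then p.2 else 0))
      = cc.map (fun p => if kv.2.contains p.1 then p.2 else 0) := by
    apply List.map_congr_left
    intro p _
    by_cases hc : kv.2.contains p.1
    · rw [if_pos ((rk_mem_index cd hnd k kv.2 hmem p.1).mpr hc), if_pos hc]
    · rw [if_neg (fun h => hc ((rk_mem_index cd hnd k kv.2 hmem p.1).mp h)), if_neg hc]
  rw [hA, hB, hsum, rk_score_sum]
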